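-- pv_equiv track=rewrite | github.com/FogSift/waft | scripts/work_effort_report.py | _recent_devlog_sections
-- ===== SOURCE A (Python) =====
-- def _recent_devlog_sections(devlog_text: str, limit: int) -> list[tuple[str, str]]:
--     lines = devlog_text.splitlines()
--     indices = [i for i, line in enumerate(lines) if line.startswith("## ")]
--     if not indices:
--         body = "\n".join(lines[-80:])
--         return [("Latest Notes", body)]
--     out: list[tuple[str, str]] = []
--     for i in indices[-limit:]:
--         heading = lines[i][3:].strip()
--         end = len(lines)
--         for j in range(i + 1, len(lines)):
--             if lines[j].startswith("## "):
--                 end = j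
--                 break
--         block = "\n".join(lines[i + 1 : end]).strip()
--         out.append((heading, block))
--     return out
-- ===== SOURCE B (Python) =====
-- def _recent_devlog_sections(devlog_text: str, limit: int) -> list[tuple[str, str]]:
--     # One pass: group lines into (heading, body-lines) sections as we go,
--     # instead of collecting heading indices and rescanning forward for each.
--     lines = devlog_text.splitlines()
--     sections: list[tuple[str, list[str]]] = []
--     for line in lines:
--         if line.startswith("## "):
--             sections.append((line[3:].strip(), []))
--         elif sections:
--             sections[-1][1].append(line)
--     if not sections:
--         return [("Latest Notes", "\n".join(lines[-80:]))]
--     return [(h, "\n".join(body).strip()) for h, body in sections[-limit:]]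
-- ===== Notes on version B (the rewrite author's own statement) =====
-- stated objective: simpler
-- what changed: B groups lines into sections in one pass over the lines (appending each body line to the current open section) instead of collecting heading indices and re-scanning forward from each heading for the next one.
import Mathlib
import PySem

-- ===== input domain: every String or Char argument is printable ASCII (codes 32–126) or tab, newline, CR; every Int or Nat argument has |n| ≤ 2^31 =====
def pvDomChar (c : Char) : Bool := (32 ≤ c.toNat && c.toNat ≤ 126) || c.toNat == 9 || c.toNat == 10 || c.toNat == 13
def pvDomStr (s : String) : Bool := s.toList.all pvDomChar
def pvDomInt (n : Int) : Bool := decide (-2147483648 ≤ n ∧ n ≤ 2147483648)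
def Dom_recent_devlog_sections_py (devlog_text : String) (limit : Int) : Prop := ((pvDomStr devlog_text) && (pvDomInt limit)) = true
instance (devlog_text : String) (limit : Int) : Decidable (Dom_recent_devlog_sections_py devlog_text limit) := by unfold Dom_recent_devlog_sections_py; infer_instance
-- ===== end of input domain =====

-- B groups lines into sections in one pass instead of rescanning forward from each heading index (simpler single-pass decomposition); same return value.

-- ===== PORT A =====
def recent_devlog_sections_py (devlog_text : String) (limit : Int) : List (String × String) :=
  let lines := PySem.Str.splitlines devlog_text
  let indices := ((PySem.List.enumerate lines).filter (fun p => PySem.Str.startswith p.2 "## ")).map Prod.fst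
  if indices = [] then
    [("Latest Notes", PySem.Str.join "\n" (PySem.List.slice lines (some (-80)) none))]
  else
    (PySem.List.slice indices (some (-limit)) none).foldl
      (fun out i =>
        let heading := PySem.Str.strip (PySem.Str.slice (PySem.List.pyGetD lines i "") (some 3) none)
        let endIdx : Int :=
          match (PySem.List.pyRange (i + 1) (lines.length : Int) 1).find?
              (fun j => PySem.Str.startswith (PySem.List.pyGetD lines j "") "## ") with
          | some j => j
          | none => (lines.length : Int)
        let block := PySem.Str.strip (PySem.Str.join "\n" (PySem.List.slice lines (some (i + 1)) (some endIdx)))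
        out ++ [(heading, block)]) []

-- ===== PORT B =====
def pvIsH (line : String) : Bool := PySem.Str.startswith line "## "

def pvStep (secs : List (String × List String)) (line : String) : List (String × List String) :=
  if pvIsH line then
    secs ++ [(PySem.Str.strip (PySem.Str.slice line (some 3) none), [])]
  else
    match secs.getLast? with
    | none => secs
    | some last => secs.dropLast ++ [(last.1, last.2 ++ [line])]

def recent_devlog_sections_py_alt (devlog_text : String) (limit : Int) : List (String × String) :=
  let lines := PySem.Str.splitlines devlog_text
  let sections := lines.foldl pvStep []
  if sections = [] then
    [("Latest Notes", PySem.Str.join "\n" (PySem.List.slice lines (some (-80)) none))]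
  else
    (PySem.List.slice sections (some (-limit)) none).map
      (fun p => (p.1, PySem.Str.strip (PySem.Str.join "\n" p.2)))

-- ===== PRECONDITION & SPEC =====
def Spec_recent_devlog_sections_py (devlog_text : String) (limit : Int) (out : List (String × String)) : Prop := out = recent_devlog_sections_py_alt devlog_text limit
instance (devlog_text : String) (limit : Int) (out : List (String × String)) : Decidable (Spec_recent_devlog_sections_py devlog_text limit out) := by unfold Spec_recent_devlog_sections_py; infer_instance

-- ===== CLAIM (what is proved, stated in full; the proofs are below) =====
def Claim_equal_recent_devlog_sections_py : Prop := ∀ (devlog_text : String) (limit : Int), Dom_recent_devlog_sections_py devlog_text limit → Spec_recent_devlog_sections_py devlog_text limit (recent_devlog_sections_py devlog_text limit)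

-- ===== LEMMAS AND PROOFS =====

def pvTitle (l : String) : String := PySem.Str.strip (PySem.Str.slice l (some 3) none)

def pvGroups : List String → List (String × List String)
  | [] => []
  | l :: ls => if pvIsH l then (pvTitle l, ls.takeWhile (fun x => !pvIsH x)) :: pvGroups ls else pvGroups ls

def pvG (p : String × List String) : String × String :=
  (p.1, PySem.Str.strip (PySem.Str.join "\n" p.2))

def pvF (L : List String) (i : Int) : String × String :=
  let heading := PySem.Str.strip (PySem.Str.slice (PySem.List.pyGetD L i "") (some 3) none)
  let endIdx : Int :=
    match (PySem.List.pyRange (i + 1) (L.length : Int) 1).find?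
        (fun j => PySem.Str.startswith (PySem.List.pyGetD L j "") "## ") with
    | some j => j
    | none => (L.length : Int)
  let block := PySem.Str.strip (PySem.Str.join "\n" (PySem.List.slice L (some (i + 1)) (some endIdx)))
  (heading, block)

def pvIdx (ls : List String) (s : Int) : List Int :=
  ((PySem.List.enumerate ls s).filter (fun p => PySem.Str.startswith p.2 "## ")).map Prod.fst

theorem pvIdx_cons (l : String) (ls : List String) (s : Int) :
    pvIdx (l :: ls) s = (if pvIsH l then [s] else []) ++ pvIdx ls (s + 1) := by
  unfold pvIdx
  rw [PySem.List.enumerate_cons]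
  by_cases h : pvIsH l <;> simp [pvIsH] at h <;> simp [pvIsH, h]

theorem pvStep_last (secs : List (String × List String)) (h : String) (b : List String)
    (line : String) (hl : pvIsH line = false) :
    pvStep (secs ++ [(h, b)]) line = secs ++ [(h, b ++ [line])] := by
  simp [pvStep, hl]

theorem pvFoldl_append (ls : List String) (secs : List (String × List String))
    (h : String) (b : List String) :
    ls.foldl pvStep (secs ++ [(h, b)]) =
      secs ++ (h, b ++ ls.takeWhile (fun x => !pvIsH x)) :: pvGroups ls := by
  induction ls generalizing secs h b with
  | nil => simp [pvGroups]
  | cons l ls ih =>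
    by_cases hl : pvIsH l
    · simp only [List.foldl_cons, pvStep, hl, if_true, List.append_assoc]
      have hre : secs ++ ([(h, b)] ++ [(PySem.Str.strip (PySem.Str.slice l (some 3) none), ([] : List String))]) = (secs ++ [(h, b)]) ++ [(pvTitle l, ([] : List String))] := by simp [pvTitle]
      rw [hre, ih]
      simp [pvGroups, hl]
    · simp only [List.foldl_cons, pvStep_last secs h b l (by simp [hl])]
      rw [ih]
      simp [pvGroups, hl]

theorem pvFoldl_nil (ls : List String) : ls.foldl pvStep [] = pvGroups ls := by
  induction ls with
  | nil => rfl
  | cons l ls ih =>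
    by_cases hl : pvIsH l
    · simp only [List.foldl_cons, pvStep, hl, if_true, List.nil_append]
      have hre : [(PySem.Str.strip (PySem.Str.slice l (some 3) none), ([] : List String))] = ([] : List (String × List String)) ++ [(pvTitle l, ([] : List String))] := by simp [pvTitle]
      rw [hre, pvFoldl_append]
      simp [pvGroups, hl]
    · simp only [List.foldl_cons, pvStep, hl, if_false]
      simpa [pvGroups, hl] using ih

theorem pvTake_findIdx (ls : List String) :
    ls.take (ls.findIdx pvIsH) = ls.takeWhile (fun x => !pvIsH x) := by
  induction ls with
  | nil => rfl
  | cons l ls ih =>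
    by_cases hl : pvIsH l
    · simp [List.findIdx_cons, hl, List.takeWhile_cons, hl]
    · simp [List.findIdx_cons, hl, List.takeWhile_cons, ih]

theorem pvFind (L : List String) (n : Nat) :
    ∀ p : Nat, p + n = L.length →
    (match (PySem.List.pyRange ((p : Int)) (L.length : Int) 1).find?
        (fun j => PySem.Str.startswith (PySem.List.pyGetD L j "") "## ") with
      | some j => j
      | none => (L.length : Int)) = ((p + (L.drop p).findIdx pvIsH : Nat) : Int) := by
  induction n with
  | zero =>
    intro p hp
    have hp' : p = L.length := by omega
    subst hp'
    have hr : PySem.List.pyRange ((L.length : Nat) : Int) ((L.length : Nat) : Int) = [] := by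
      simp [PySem.List.pyRange]
    rw [hr]
    simp
  | succ n ih =>
    intro p hp
    have hlt : p < L.length := by omega
    rw [PySem.List.pyRange_one_cons (by exact_mod_cast hlt)]
    have hget : PySem.List.pyGetD L ((p : Nat) : Int) "" = L[p] := by
      rw [PySem.List.pyGetD_natCast, List.getD_eq_getElem?_getD, List.getElem?_eq_getElem hlt]
      rfl
    rw [List.drop_eq_getElem_cons hlt, List.findIdx_cons]
    by_cases hh : pvIsH L[p]
    · rw [List.find?_cons_of_pos (by simpa [pvIsH, hget] using hh)]
      simp [hh]
    · rw [List.find?_cons_of_neg (by simpa [pvIsH, hget] using hh)]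
      have hcast : ((p : Int) + 1) = (((p + 1 : Nat) : Nat) : Int) := by push_cast; ring
      rw [hcast, ih (p + 1) (by omega)]
      simp only [hh, cond_false]
      push_cast
      ring

theorem pvHead (pre : List String) (l : String) (ls : List String) :
    pvF ((pre ++ [l]) ++ ls) ((pre.length : Nat) : Int) = pvG (pvTitle l, ls.takeWhile (fun x => !pvIsH x)) := by
  have hlen : ((pre ++ [l]) ++ ls).length = (pre.length + 1) + ls.length := by simp; omega
  have hdrop : ((pre ++ [l]) ++ ls).drop (pre.length + 1) = ls := by
    have h1 : (pre ++ [l]).length = pre.length + 1 := by simp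
    rw [← h1, List.drop_left]
  have hget : PySem.List.pyGetD ((pre ++ [l]) ++ ls) ((pre.length : Nat) : Int) "" = l := by
    rw [PySem.List.pyGetD_natCast, List.append_assoc, List.getD_eq_getElem?_getD,
        List.getElem?_append_right (Nat.le_refl pre.length)]
    simp
  have hfind := pvFind ((pre ++ [l]) ++ ls) ls.length (pre.length + 1) hlen.symm
  rw [hdrop] at hfind
  have hcast : ((pre.length : Nat) : Int) + 1 = (((pre.length + 1 : Nat) : Nat) : Int) := by
    push_cast; ring
  unfold pvF pvG pvTitle
  simp only [hget, hcast, hfind]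
  have hcast2 : (((pre.length + 1 + ls.findIdx pvIsH : Nat) : Nat) : Int)
      = (((pre.length + 1 : Nat) : Nat) : Int) + ((ls.findIdx pvIsH : Nat) : Int) := by
    push_cast; ring
  rw [hcast2, PySem.List.slice_natCast_add, hdrop, pvTake_findIdx]

theorem pvMain (ls : List String) : ∀ pre : List String,
    (pvIdx ls (pre.length : Int)).map (pvF (pre ++ ls)) = (pvGroups ls).map pvG := by
  induction ls with
  | nil => intro pre; simp [pvIdx, pvGroups, PySem.List.enumerate]
  | cons l ls ih =>
    intro pre
    have happ : pre ++ l :: ls = (pre ++ [l]) ++ ls := by simp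
    have hcast : ((pre.length : Nat) : Int) + 1 = (((pre ++ [l]).length : Nat) : Int) := by
      simp
    rw [pvIdx_cons, happ]
    by_cases hl : pvIsH l
    · rw [if_pos hl]
      simp only [List.singleton_append, List.map_cons]
      rw [hcast, ih (pre ++ [l])]
      have hgr : pvGroups (l :: ls) = (pvTitle l, ls.takeWhile (fun x => !pvIsH x)) :: pvGroups ls := by
        simp [pvGroups, hl]
      rw [hgr, List.map_cons, pvHead pre l ls]
    · rw [if_neg hl]
      simp only [List.nil_append]
      rw [hcast, ih (pre ++ [l])]
      have hgr : pvGroups (l :: ls) = pvGroups ls := by simp [pvGroups, hl]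
      rw [hgr]

theorem pvFoldA (L : List String) (xs : List Int) :
    xs.foldl
      (fun out i =>
        let heading := PySem.Str.strip (PySem.Str.slice (PySem.List.pyGetD L i "") (some 3) none)
        let endIdx : Int :=
          match (PySem.List.pyRange (i + 1) (L.length : Int) 1).find?
              (fun j => PySem.Str.startswith (PySem.List.pyGetD L j "") "## ") with
          | some j => j
          | none => (L.length : Int)
        let block := PySem.Str.strip (PySem.Str.join "\n" (PySem.List.slice L (some (i + 1)) (some endIdx)))
        out ++ [(heading, block)]) [] = xs.map (pvF L) :=
  (PySem.List.foldl_append_singleton_eq_map (pvF L) xs []).trans (List.nil_append _)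

theorem pvSliceMap {α β : Type} (f : α → β) (xs : List α) (a : Int) :
    (PySem.List.slice xs (some a) none).map f = PySem.List.slice (xs.map f) (some a) none := by
  rw [PySem.List.slice_some_none, PySem.List.slice_some_none, List.map_drop, List.length_map]

-- ===== VERDICT (by name: the statement is the Claim_ definition above) =====
theorem recent_devlog_sections_py_spec : Claim_equal_recent_devlog_sections_py := by
  intro d limit _
  unfold Spec_recent_devlog_sections_py recent_devlog_sections_py recent_devlog_sections_py_alt
  simp only []
  set L := PySem.Str.splitlines d with hL
  have hmain := pvMain L []
  simp only [List.nil_append, List.length_nil, Nat.cast_zero] at hmain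
  have hidx : ((PySem.List.enumerate L).filter (fun p => PySem.Str.startswith p.2 "## ")).map Prod.fst = pvIdx L 0 := rfl
  have hsec : L.foldl pvStep [] = pvGroups L := pvFoldl_nil L
  have hlen : (pvIdx L 0).length = (pvGroups L).length := by
    have := congrArg List.length hmain
    simpa using this
  rw [hidx, hsec]
  by_cases hni : pvIdx L 0 = []
  · have : pvGroups L = [] := by
      rw [hni] at hlen; exact List.eq_nil_of_length_eq_zero hlen.symm
    simp [hni, this]
  · have hg : pvGroups L ≠ [] := by
      intro h; apply hni
      rw [h] at hlen; exact List.eq_nil_of_length_eq_zero hlen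
    rw [if_neg hni, if_neg hg, pvFoldA]
    calc (PySem.List.slice (pvIdx L 0) (some (-limit)) none).map (pvF L)
        = PySem.List.slice ((pvIdx L 0).map (pvF L)) (some (-limit)) none := pvSliceMap _ _ _
      _ = PySem.List.slice ((pvGroups L).map pvG) (some (-limit)) none := by rw [hmain]
      _ = (PySem.List.slice (pvGroups L) (some (-limit)) none).map pvG := (pvSliceMap _ _ _).symm
      _ = _ := by simp [pvG]
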